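-- pv_equiv track=rewrite | github.com/ASajja7724/Image-Processor | pool.py | max_pool
-- ===== SOURCE A (Python) =====
-- def max_pool(matrix, pool_size=2):
--     pooled_vals = []
--
--     # The modulus is used to prevent going out of range (i.e if the matrix cannot be split evenly by the pool siz)
--     for i in range(0, len(matrix) - len(matrix) % pool_size, pool_size):
--         for j in range(0, len(matrix[0]) - len(matrix[0]) % pool_size, pool_size):
--             section = [
--                 matrix[i][j], matrix[i][j+1],
--                 matrix[i+1][j], matrix[i+1][j+1]
--             ]
--
--             # Use max pooling to get the max value
--             max_val = max(section)
--
--             pooled_vals.append(max_val)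
--
--     # reconstuct the pooled values into a matrix
--     new_matrix = []
--     count = 0
--     for _ in range(len(matrix)//pool_size):
--         row = []
--         for _ in range(len(matrix[0])//pool_size):
--             row.append(pooled_vals[count])
--             count += 1
--
--         new_matrix.append(row)
--
--     return new_matrix
-- ===== SOURCE B (Python) =====
-- def max_pool(matrix, pool_size=2):
--     # Build the pooled matrix directly, row by row, instead of collecting a flat
--     # list of pooled values and reshaping it with a running counter.
--     new_matrix = []
--     for i in range(0, len(matrix) - len(matrix) % pool_size, pool_size):
--         cols = len(matrix[0])
--         new_matrix.append([
--             max(matrix[i][j], matrix[i][j + 1], matrix[i + 1][j], matrix[i + 1][j + 1])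
--             for j in range(0, cols - cols % pool_size, pool_size)
--         ])
--     return new_matrix
-- ===== Notes on version B (the rewrite author's own statement) =====
-- stated objective: simpler
-- what changed: B builds each pooled row in place and appends it directly, removing A's intermediate flat pooled_vals list and the whole count-based reshape pass.
-- outside the precondition, e.g. on max_pool([[1, 2], [3, 4]], 1): A raises IndexError, B raises IndexError; on max_pool([[1, 2], [3, 4]], 0): A raises ZeroDivisionError, B raises ZeroDivisionError
import Mathlib
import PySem

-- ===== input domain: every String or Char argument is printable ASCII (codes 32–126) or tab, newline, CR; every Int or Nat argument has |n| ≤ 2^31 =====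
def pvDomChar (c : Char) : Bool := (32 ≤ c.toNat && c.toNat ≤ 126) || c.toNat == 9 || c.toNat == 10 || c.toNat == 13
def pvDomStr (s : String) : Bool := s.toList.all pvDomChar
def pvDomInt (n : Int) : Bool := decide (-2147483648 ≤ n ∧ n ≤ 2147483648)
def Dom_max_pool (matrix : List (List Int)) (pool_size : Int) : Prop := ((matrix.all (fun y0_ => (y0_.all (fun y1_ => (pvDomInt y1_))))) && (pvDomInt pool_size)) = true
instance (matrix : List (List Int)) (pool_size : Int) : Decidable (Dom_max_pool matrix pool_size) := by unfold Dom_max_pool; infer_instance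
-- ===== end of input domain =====

-- B removes A's intermediate flat pooled_vals list and the count-based reshape pass,
-- appending each pooled row directly ('simpler'); return values agree on all of Pre_.

-- ===== PORT A =====
def max_pool (matrix : List (List Int)) (pool_size : Int) : List (List Int) :=
  let rows : Int := (matrix.length : Int)
  -- flat list of pooled values
  let pooled : List Int :=
    (PySem.List.pyRange 0 (rows - PySem.Int.mod rows pool_size) pool_size).foldl
      (fun pooled i =>
        let cols : Int := ((PySem.List.pyGetD matrix 0 []).length : Int)
        (PySem.List.pyRange 0 (cols - PySem.Int.mod cols pool_size) pool_size).foldl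
          (fun pooled j =>
            let section_ : List Int :=
              [PySem.List.pyGetD (PySem.List.pyGetD matrix i []) j 0,
               PySem.List.pyGetD (PySem.List.pyGetD matrix i []) (j + 1) 0,
               PySem.List.pyGetD (PySem.List.pyGetD matrix (i + 1) []) j 0,
               PySem.List.pyGetD (PySem.List.pyGetD matrix (i + 1) []) (j + 1) 0]
            -- max(section): (section has 4 elements, so max? is some; default never used)
            let max_val : Int := (PySem.List.max? section_ (fun y => y)).getD 0
            pooled ++ [max_val]) pooled)
      []
  -- reconstruct the pooled values into a matrix, with a running counter
  let st :=
    (PySem.List.pyRange 0 (PySem.Int.floordiv rows pool_size) 1).foldl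
      (fun (st : List (List Int) × Int) (_ : Int) =>
        let cols : Int := ((PySem.List.pyGetD matrix 0 []).length : Int)
        let st2 :=
          (PySem.List.pyRange 0 (PySem.Int.floordiv cols pool_size) 1).foldl
            (fun (st2 : List Int × Int) (_ : Int) =>
              (st2.1 ++ [PySem.List.pyGetD pooled st2.2 0], st2.2 + 1)) ([], st.2)
        (st.1 ++ [st2.1], st2.2))
      ([], 0)
  st.1

-- ===== PORT B =====
def max_pool_alt (matrix : List (List Int)) (pool_size : Int) : List (List Int) :=
  let rows : Int := (matrix.length : Int)
  (PySem.List.pyRange 0 (rows - PySem.Int.mod rows pool_size) pool_size).foldl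
    (fun new_matrix i =>
      let cols : Int := ((PySem.List.pyGetD matrix 0 []).length : Int)
      new_matrix ++
        [(PySem.List.pyRange 0 (cols - PySem.Int.mod cols pool_size) pool_size).map
          (fun j =>
            max (max (max (PySem.List.pyGetD (PySem.List.pyGetD matrix i []) j 0)
                          (PySem.List.pyGetD (PySem.List.pyGetD matrix i []) (j + 1) 0))
                     (PySem.List.pyGetD (PySem.List.pyGetD matrix (i + 1) []) j 0))
                (PySem.List.pyGetD (PySem.List.pyGetD matrix (i + 1) []) (j + 1) 0))])
    []

-- ===== PRECONDITION & SPEC =====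
-- Pre_ excludes exactly the inputs where Python A raises: pool_size = 0 (ZeroDivisionError
-- in the range bounds) and the inputs where one of the four pooled accesses is out of
-- range (IndexError), i.e. the bounds below fail for some visited (i, j).
def Pre_max_pool (matrix : List (List Int)) (pool_size : Int) : Prop :=
  pool_size ≠ 0 ∧
  ∀ i ∈ PySem.List.pyRange 0 ((matrix.length : Int) - PySem.Int.mod (matrix.length : Int) pool_size) pool_size,
    ∀ j ∈ PySem.List.pyRange 0 (((matrix.headD []).length : Int) - PySem.Int.mod ((matrix.headD []).length : Int) pool_size) pool_size,
      i + 1 < (matrix.length : Int) ∧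
      j + 1 < ((PySem.List.pyGetD matrix i []).length : Int) ∧
      j + 1 < ((PySem.List.pyGetD matrix (i + 1) []).length : Int)
instance (matrix : List (List Int)) (pool_size : Int) : Decidable (Pre_max_pool matrix pool_size) := by
  unfold Pre_max_pool; infer_instance
def pvWitness_max_pool : List (List Int) × Int := ([[1, 2], [3, 4]], 2)

def Spec_max_pool (matrix : List (List Int)) (pool_size : Int) (out : List (List Int)) : Prop := out = max_pool_alt matrix pool_size
instance (matrix : List (List Int)) (pool_size : Int) (out : List (List Int)) : Decidable (Spec_max_pool matrix pool_size out) := by unfold Spec_max_pool; infer_instance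

-- ===== CLAIM (what is proved, stated in full; the proofs are below) =====
def Claim_equal_max_pool : Prop := ∀ (matrix : List (List Int)) (pool_size : Int), Dom_max_pool matrix pool_size → Pre_max_pool matrix pool_size → Spec_max_pool matrix pool_size (max_pool matrix pool_size)

-- ===== LEMMAS AND PROOFS =====

-- number of iterations of A's pooling loops = number of iterations of its reshape loops
theorem pv_len_range (n : Nat) (ps : Int) (hps : ps ≠ 0) :
    (PySem.List.pyRange 0 ((n : Int) - PySem.Int.mod (n : Int) ps) ps).length
      = (PySem.Int.floordiv (n : Int) ps).toNat := by
  have hqm := PySem.Int.floordiv_mul_add_mod (n : Int) ps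
  set q := PySem.Int.floordiv (n : Int) ps with hq
  set m := PySem.Int.mod (n : Int) ps with hm
  rcases lt_or_gt_of_ne hps with hneg | hpos
  · -- ps < 0 : range empty, q ≤ 0
    have hb := PySem.Int.mod_neg_bounds (a := (n : Int)) hneg
    have hq0 : q ≤ 0 := by nlinarith [Int.natCast_nonneg n]
    have : PySem.List.pyRange 0 ((n : Int) - m) ps = [] := by
      simp only [PySem.List.pyRange]
      rw [if_neg hps, if_neg (by omega : ¬ (0:Int) < ps), if_neg (by omega : ¬ (n:Int) - m < 0)]
      simp
    rw [this]; simp; omega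
  · -- ps > 0
    have hm0 : 0 ≤ m := PySem.Int.mod_nonneg _ hpos
    have hmlt : m < ps := PySem.Int.mod_lt _ hpos
    have hq0 : 0 ≤ q := by nlinarith [Int.natCast_nonneg n]
    rw [PySem.List.pyRange_of_pos _ _ hpos]
    simp only [List.length_map, List.length_range]
    by_cases hq' : q = 0
    · have hmn : m = (n : Int) := by rw [hq'] at hqm; simpa using hqm
      rw [if_neg (by omega : ¬ (0:Int) < (n:Int) - m)]; omega
    · have hqpos : 0 < q := lt_of_le_of_ne hq0 (Ne.symm hq')
      rw [if_pos (by nlinarith : (0:Int) < (n:Int) - m)]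
      have hnm : (n : Int) - m = q * ps := by omega
      have : ((n : Int) - m - 0 + ps - 1) / ps = q := by
        rw [hnm]
        have : q * ps - 0 + ps - 1 = (ps - 1) + q * ps := by ring
        rw [this, Int.add_mul_ediv_right _ _ (by omega : ps ≠ 0),
            Int.ediv_eq_zero_of_lt (by omega) (by omega)]
        omega
      rw [this]

-- A's inner reshape loop copies one row out of the flat pooled list, advancing the counter
theorem pv_fill_row (pooled : List Int) (pre row rest acc : List Int) (l : List Int)
    (hp : pooled = pre ++ (row ++ rest)) (hl : l.length = row.length) :
    l.foldl (fun (st2 : List Int × Int) (_ : Int) =>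
        (st2.1 ++ [PySem.List.pyGetD pooled st2.2 0], st2.2 + 1)) (acc, (pre.length : Int))
      = (acc ++ row, (pre.length : Int) + row.length) := by
  induction row generalizing pre acc l with
  | nil => cases l with
    | nil => simp
    | cons a t => simp at hl
  | cons x row ih =>
    cases l with
    | nil => simp at hl
    | cons a t =>
      simp only [List.foldl_cons]
      have hget : PySem.List.pyGetD pooled (pre.length : Int) 0 = x := by
        simp only [PySem.List.pyGetD, hp]
        rw [show pre ++ ((x :: row) ++ rest) = pre ++ x :: (row ++ rest) by simp,
            PySem.List.pyGet?_append_length]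
        rfl
      rw [hget]
      have h2 := ih (pre := pre ++ [x]) (acc := acc ++ [x]) (l := t)
        (by rw [hp]; simp) (by simpa using hl)
      simp only [List.length_append, List.length_nil, List.length_cons,
        List.append_assoc, List.singleton_append] at h2 ⊢
      push_cast at h2 ⊢
      rw [show (pre.length : Int) + 1 = (pre.length : Int) + (1 : Int) by ring] at h2
      rw [h2]
      simp; ring

-- A's outer reshape loop rebuilds the list of rows from its flattening
theorem pv_fill_mat (pooled : List Int) (l2 : List Int)
    (RS : List (List Int)) (pre : List Int) (acc : List (List Int)) (l1 : List Int)
    (hp : pooled = pre ++ RS.flatten) (hrow : ∀ r ∈ RS, r.length = l2.length)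
    (hl1 : l1.length = RS.length) :
    l1.foldl (fun (st : List (List Int) × Int) (_ : Int) =>
        (st.1 ++ [(l2.foldl (fun (st2 : List Int × Int) (_ : Int) =>
            (st2.1 ++ [PySem.List.pyGetD pooled st2.2 0], st2.2 + 1)) ([], st.2)).1],
         (l2.foldl (fun (st2 : List Int × Int) (_ : Int) =>
            (st2.1 ++ [PySem.List.pyGetD pooled st2.2 0], st2.2 + 1)) ([], st.2)).2)) (acc, (pre.length : Int))
      = (acc ++ RS, (pre.length : Int) + RS.flatten.length) := by
  induction RS generalizing pre acc l1 with
  | nil => cases l1 with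
    | nil => simp
    | cons a t => simp at hl1
  | cons r RS ih =>
    cases l1 with
    | nil => simp at hl1
    | cons a t =>
      simp only [List.foldl_cons]
      have h1 : l2.foldl (fun (st2 : List Int × Int) (_ : Int) =>
            (st2.1 ++ [PySem.List.pyGetD pooled st2.2 0], st2.2 + 1)) ([], (pre.length : Int))
          = (([] : List Int) ++ r, (pre.length : Int) + r.length) :=
        pv_fill_row pooled pre r RS.flatten [] l2
          (by rw [hp]; simp) (hrow r (by simp)).symm
      simp only [h1, List.nil_append]
      have h2 := ih (pre := pre ++ r) (acc := acc ++ [r]) (l1 := t)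
        (by rw [hp]; simp) (fun s hs => hrow s (by simp [hs])) (by simpa using hl1)
      simp only [List.length_append, List.append_assoc, List.singleton_append] at h2 ⊢
      push_cast at h2 ⊢
      rw [h2]; simp; ring

-- A = B for every nonzero pool_size (in particular on all of Pre_)
theorem pv_main (matrix : List (List Int)) (pool_size : Int) (hps : pool_size ≠ 0) :
    max_pool matrix pool_size = max_pool_alt matrix pool_size := by
  unfold max_pool max_pool_alt
  simp only [PySem.List.max?_id_cons, List.foldl_cons, List.foldl_nil, Option.getD_some,
    PySem.List.foldl_append_singleton_eq_map, PySem.List.foldl_append_eq_flatMap]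
  set f := fun i => (PySem.List.pyRange 0
      (((PySem.List.pyGetD matrix 0 []).length : Int) - PySem.Int.mod ((PySem.List.pyGetD matrix 0 []).length : Int) pool_size) pool_size).map
      (fun j =>
        max (max (max (PySem.List.pyGetD (PySem.List.pyGetD matrix i []) j 0)
                      (PySem.List.pyGetD (PySem.List.pyGetD matrix i []) (j + 1) 0))
                 (PySem.List.pyGetD (PySem.List.pyGetD matrix (i + 1) []) j 0))
            (PySem.List.pyGetD (PySem.List.pyGetD matrix (i + 1) []) (j + 1) 0)) with hf
  set n2 := (PySem.List.pyGetD matrix 0 []).length with hn2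
  set n1 := matrix.length with hn1
  set R := PySem.List.pyRange 0 ((n1 : Int) - PySem.Int.mod (n1 : Int) pool_size) pool_size with hR
  set C := PySem.List.pyRange 0 ((n2 : Int) - PySem.Int.mod (n2 : Int) pool_size) pool_size with hC
  set l1 := PySem.List.pyRange 0 (PySem.Int.floordiv (n1 : Int) pool_size) 1 with hl1
  set l2 := PySem.List.pyRange 0 (PySem.Int.floordiv (n2 : Int) pool_size) 1 with hl2
  have hflat : ([] : List Int) ++ List.flatMap f R = ([] : List Int) ++ (R.map f).flatten := by
    simp [List.flatMap_def]
  have hrow : ∀ r ∈ R.map f, r.length = l2.length := by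
    intro r hr
    obtain ⟨i, _, rfl⟩ := List.mem_map.1 hr
    rw [hf]
    simp only [List.length_map, hl2, PySem.List.length_pyRange_one, hC]
    rw [pv_len_range n2 pool_size hps]
    simp
  have hlen1 : l1.length = (R.map f).length := by
    simp only [List.length_map, hl1, PySem.List.length_pyRange_one, hR]
    rw [pv_len_range n1 pool_size hps]
    simp
  have hmat := pv_fill_mat (([] : List Int) ++ List.flatMap f R) l2 (R.map f) [] [] l1
    hflat hrow hlen1
  simp only [List.length_nil, Nat.cast_zero] at hmat
  rw [hmat]

-- ===== VERDICT (by name: the statement is the Claim_ definition above) =====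
theorem max_pool_spec : Claim_equal_max_pool := by
  intro matrix pool_size _ hpre
  unfold Spec_max_pool
  exact pv_main matrix pool_size hpre.1
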